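-- pv_equiv track=rewrite | github.com/MikeyV-ET/agentabide | adapters/slack_adapter.py | parse_slack_commands
-- ===== SOURCE A (Python) =====
-- def parse_slack_commands(text):
--     """Parse agent output for Slack slash commands.
--
--     Returns (commands, remaining_text) where commands is a list of
--     dicts like {"type": "msg", "target": "<user>", "text": "hello"}
--     and remaining_text is everything that wasn't a command.
--
--     /msg is multiline: all lines after /msg until the next /msg or end
--     of text are included in the message body.
--
--     Supported commands:
--       /msg <@user_id> <text>   - send DM to user by ID
--       /msg @username <text>    - send DM to user by display name
--       /msg <channel_id> <text> - send to specific channel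
--     """
--     commands = []
--     remaining = []
--     current_cmd = None  # tracks active /msg command for multiline
--
--     for line in text.split("\n"):
--         stripped = line.strip()
--
--         if stripped.startswith("/msg "):
--             # Flush previous command if any
--             if current_cmd is not None:
--                 commands.append(current_cmd)
--                 current_cmd = None
--
--             parts = stripped[5:].strip().split(" ", 1)
--             if len(parts) >= 1:
--                 target = parts[0]
--                 msg_text = parts[1] if len(parts) == 2 else ""
--                 # Strip Slack user mention formatting: <@U12345> -> U12345
--                 if target.startswith("<@") and target.endswith(">"):
--                     target = target[2:-1]
--                 current_cmd = {"type": "msg", "target": target, "text": msg_text}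
--         elif current_cmd is not None:
--             # Continuation of multiline /msg
--             current_cmd["text"] += "\n" + line
--         else:
--             remaining.append(line)
--
--     # Flush final command
--     if current_cmd is not None:
--         commands.append(current_cmd)
--
--     remaining_text = "\n".join(remaining).strip()
--     return commands, remaining_text
-- ===== SOURCE B (Python) =====
-- def parse_slack_commands(text):
--     """Block-based reimplementation: index the /msg lines once, then
--     slice the line list into blocks instead of running a state machine."""
--     lines = text.split("\n")
--
--     def is_msg(line):
--         return line.strip().startswith("/msg ")
--
--     i = 0
--     while i < len(lines) and not is_msg(lines[i]):
--         i += 1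
--     remaining_text = "\n".join(lines[:i]).strip()
--
--     commands = []
--     while i < len(lines):
--         stripped = lines[i].strip()
--         parts = stripped[5:].strip().split(" ", 1)
--         target = parts[0]
--         body = parts[1] if len(parts) == 2 else ""
--         if target.startswith("<@") and target.endswith(">"):
--             target = target[2:-1]
--         j = i + 1
--         while j < len(lines) and not is_msg(lines[j]):
--             j += 1
--         body += "".join("\n" + l for l in lines[i + 1:j])
--         commands.append({"type": "msg", "target": target, "text": body})
--         i = j
--     return commands, remaining_text
-- ===== Notes on version B (the rewrite author's own statement) =====
-- stated objective: alternative
-- what changed: Replaces A's single-pass three-way state machine (commands/remaining/current_cmd mutated per line) by a two-phase block decomposition: scan once to the first /msg line to form remaining_text, then slice the line list into one block per /msg line (header parse + span of continuation lines joined in one shot).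
import Mathlib
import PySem

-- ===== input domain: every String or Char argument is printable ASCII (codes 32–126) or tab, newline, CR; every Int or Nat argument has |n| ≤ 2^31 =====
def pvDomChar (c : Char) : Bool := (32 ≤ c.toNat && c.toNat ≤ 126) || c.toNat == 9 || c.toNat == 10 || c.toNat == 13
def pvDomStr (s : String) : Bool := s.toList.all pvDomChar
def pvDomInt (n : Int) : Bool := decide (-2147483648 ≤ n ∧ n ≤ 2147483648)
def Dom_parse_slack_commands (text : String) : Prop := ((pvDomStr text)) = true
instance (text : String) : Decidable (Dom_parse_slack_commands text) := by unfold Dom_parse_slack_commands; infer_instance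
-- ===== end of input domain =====

-- B replaces A's one-pass state machine by an index/block decomposition (prefix of non-/msg lines, then
-- one block per /msg line); same cost, objective: alternative decomposition. Return value only; no mutation.

-- ===== PORT A =====
-- A's loop state: (commands, remaining, current_cmd); one step per line of text.
def pvStepA (st : List (PySem.Dict String String) × List String × Option (PySem.Dict String String))
    (line : String) : List (PySem.Dict String String) × List String × Option (PySem.Dict String String) :=
  match st with
  | (commands, remaining, current_cmd) =>
    let stripped := PySem.Str.strip line
    if PySem.Str.startswith stripped "/msg " then
      let commands := match current_cmd with | some c => commands ++ [c] | none => commands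
      let parts := (PySem.Str.splitMax? (PySem.Str.strip (PySem.Str.slice stripped (some 5) none)) " " 1).getD []
      if 1 ≤ parts.length then
        let target := parts.headD ""
        let msg_text := if parts.length = 2 then parts.getD 1 "" else ""
        let target := if PySem.Str.startswith target "<@" && PySem.Str.endswith target ">" then
            PySem.Str.slice target (some 2) (some (-1)) else target
        (commands, remaining,
          some (((PySem.Dict.empty.insert "type" "msg").insert "target" target).insert "text" msg_text))
      else (commands, remaining, none)
    else
      match current_cmd with
      | some c => (commands, remaining, some (c.modify "text" "" (fun t => t ++ "\n" ++ line)))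
      | none => (commands, remaining ++ [line], none)

def parse_slack_commands (text : String) : (List (List (String × String))) × String :=
  match ((PySem.Str.split? text "\n").getD []).foldl pvStepA ([], [], none) with
  | (commands, remaining, current_cmd) =>
    let commands := match current_cmd with | some c => commands ++ [c] | none => commands
    (commands.map PySem.Dict.items, PySem.Str.strip (PySem.Str.join "\n" remaining))

-- ===== PORT B =====
def pvIsMsg (line : String) : Bool := PySem.Str.startswith (PySem.Str.strip line) "/msg "

-- header line of a block: target and first-line text
def pvHeader (line : String) : String × String :=
  let stripped := PySem.Str.strip line
  let parts := (PySem.Str.splitMax? (PySem.Str.strip (PySem.Str.slice stripped (some 5) none)) " " 1).getD []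
  let target := parts.headD ""
  let body := if parts.length = 2 then parts.getD 1 "" else ""
  (if PySem.Str.startswith target "<@" && PySem.Str.endswith target ">" then
      PySem.Str.slice target (some 2) (some (-1)) else target, body)

-- one block per /msg line: the header line plus the following non-/msg lines
def pvBlocks : List String → List (List (String × String))
  | [] => []
  | l :: ls =>
    [("type", "msg"), ("target", (pvHeader l).1),
     ("text", (pvHeader l).2 ++ PySem.Str.join "" ((ls.takeWhile (fun x => !pvIsMsg x)).map (fun x => "\n" ++ x)))]
      :: pvBlocks (ls.dropWhile (fun x => !pvIsMsg x))
  termination_by ls => ls.length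
  decreasing_by
    have := List.length_dropWhile_le (fun x => !pvIsMsg x) ls
    simp
    omega

def parse_slack_commands_alt (text : String) : (List (List (String × String))) × String :=
  let lines := (PySem.Str.split? text "\n").getD []
  (pvBlocks (lines.dropWhile (fun x => !pvIsMsg x)),
   PySem.Str.strip (PySem.Str.join "\n" (lines.takeWhile (fun x => !pvIsMsg x))))

-- ===== PRECONDITION & SPEC =====
def Spec_parse_slack_commands (text : String) (out : (List (List (String × String))) × String) : Prop := out = parse_slack_commands_alt text
instance (text : String) (out : (List (List (String × String))) × String) : Decidable (Spec_parse_slack_commands text out) := by unfold Spec_parse_slack_commands; infer_instance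

-- ===== CLAIM (what is proved, stated in full; the proofs are below) =====
def Claim_equal_parse_slack_commands : Prop := ∀ (text : String), Dom_parse_slack_commands text → Spec_parse_slack_commands text (parse_slack_commands text)

-- ===== LEMMAS AND PROOFS =====

-- the dict A keeps for the current command
def pvMk (t b : String) : PySem.Dict String String :=
  ((PySem.Dict.empty.insert "type" "msg").insert "target" t).insert "text" b

def pvFlush (cmds : List (PySem.Dict String String)) (cur : Option (PySem.Dict String String)) :
    List (PySem.Dict String String) :=
  match cur with | some c => cmds ++ [c] | none => cmds

-- the finalization A performs after its fold
def pvOut (st : List (PySem.Dict String String) × List String × Option (PySem.Dict String String)) :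
    (List (List (String × String))) × List String :=
  match st with | (c, r, cur) => ((pvFlush c cur).map PySem.Dict.items, r)

lemma pvItems_mk (t b : String) : (pvMk t b).items = [("type", "msg"), ("target", t), ("text", b)] := rfl

lemma pvModify_mk (t b s : String) :
    (pvMk t b).modify "text" "" (fun x => x ++ "\n" ++ s) = pvMk t (b ++ "\n" ++ s) := rfl

lemma pvGoNeNil (sep : List Char) : ∀ (fuel m : Nat) (l cur : List Char) (acc : List (List Char)),
    PySem.Chars.splitOnMax.go sep fuel m l cur acc ≠ [] := by
  intro fuel
  induction fuel with
  | zero => intro m l cur acc; simp [PySem.Chars.splitOnMax.go]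
  | succ n ih =>
    intro m l cur acc
    cases l with
    | nil => simp [PySem.Chars.splitOnMax.go]
    | cons c rest =>
      rw [PySem.Chars.splitOnMax.go]
      split_ifs with h1 h2
      · simp
      · exact ih _ _ _ _
      · exact ih _ _ _ _

lemma pvParts_ne_nil (s : String) : (PySem.Str.splitMax? s " " 1).getD [] ≠ [] := by
  simp only [PySem.Str.splitMax?, PySem.Chars.splitMax?, PySem.Chars.splitOnMax]
  norm_num
  exact fun h => pvGoNeNil _ _ _ _ _ _ (by simpa using h)

-- A's step on a /msg line, rewritten through pvHeader
lemma pvStepA_msg (line : String) (h : pvIsMsg line = true) (cmds : List (PySem.Dict String String))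
    (rem : List String) (cur : Option (PySem.Dict String String)) :
    pvStepA (cmds, rem, cur) line = (pvFlush cmds cur, rem, some (pvMk (pvHeader line).1 (pvHeader line).2)) := by
  have hp := pvParts_ne_nil (PySem.Str.strip (PySem.Str.slice (PySem.Str.strip line) (some 5) none))
  have hl : 1 ≤ ((PySem.Str.splitMax? (PySem.Str.strip (PySem.Str.slice (PySem.Str.strip line) (some 5) none)) " " 1).getD []).length := by
    have h' := List.ne_nil_iff_length_pos.mp hp
    omega
  unfold pvIsMsg at h
  simp only [pvStepA, pvHeader, pvMk, pvFlush, h, if_true, if_pos hl]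

lemma pvStepA_cont (line : String) (h : pvIsMsg line = false) (cmds : List (PySem.Dict String String))
    (rem : List String) (t b : String) :
    pvStepA (cmds, rem, some (pvMk t b)) line = (cmds, rem, some (pvMk t (b ++ "\n" ++ line))) := by
  unfold pvIsMsg at h
  simp only [pvStepA, h, Bool.false_eq_true, if_false, pvModify_mk]

lemma pvStepA_rem (line : String) (h : pvIsMsg line = false) (cmds : List (PySem.Dict String String))
    (rem : List String) :
    pvStepA (cmds, rem, none) line = (cmds, rem ++ [line], none) := by
  unfold pvIsMsg at h
  simp only [pvStepA, h, Bool.false_eq_true, if_false]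

lemma pvIntersperseNil : ∀ (xs : List (List Char)), (List.intersperse ([] : List Char) xs).flatten = xs.flatten
  | [] => rfl
  | [x] => rfl
  | x :: y :: xs => by
    simp only [List.intersperse_cons₂, List.flatten_cons]
    simp [pvIntersperseNil (y :: xs)]

lemma pvJoin_nil : PySem.Str.join "" ([] : List String) = "" := rfl

lemma pvJoin_cons (b l : String) (cs : List String) :
    b ++ PySem.Str.join "" (("\n" ++ l) :: cs.map (fun x => "\n" ++ x)) =
    (b ++ "\n" ++ l) ++ PySem.Str.join "" (cs.map (fun x => "\n" ++ x)) := by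
  apply String.toList_inj.mp
  simp [PySem.Str.join, PySem.Chars.join, List.intercalate, pvIntersperseNil]

lemma pvMain_some : ∀ (ls : List String) (cmds : List (PySem.Dict String String)) (rem : List String)
    (t b : String),
    pvOut (ls.foldl pvStepA (cmds, rem, some (pvMk t b))) =
      (cmds.map PySem.Dict.items ++
        ([("type", "msg"), ("target", t),
          ("text", b ++ PySem.Str.join "" ((ls.takeWhile (fun x => !pvIsMsg x)).map (fun x => "\n" ++ x)))]
          :: pvBlocks (ls.dropWhile (fun x => !pvIsMsg x))), rem) := by
  intro ls
  induction ls with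
  | nil =>
    intro cmds rem t b
    simp [pvOut, pvFlush, pvItems_mk, pvBlocks, pvJoin_nil, String.append_empty]
  | cons l ls ih =>
    intro cmds rem t b
    by_cases hm : pvIsMsg l = true
    · rw [List.foldl_cons, pvStepA_msg l hm, ih]
      simp [pvFlush, hm, pvBlocks, pvItems_mk, pvJoin_nil, String.append_empty]
    · have hm' : pvIsMsg l = false := by simpa using hm
      rw [List.foldl_cons, pvStepA_cont l hm', ih]
      simp [hm']
      exact (pvJoin_cons b l _).symm

lemma pvMain_none : ∀ (ls : List String) (cmds : List (PySem.Dict String String)) (rem : List String),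
    pvOut (ls.foldl pvStepA (cmds, rem, none)) =
      (cmds.map PySem.Dict.items ++ pvBlocks (ls.dropWhile (fun x => !pvIsMsg x)),
       rem ++ ls.takeWhile (fun x => !pvIsMsg x)) := by
  intro ls
  induction ls with
  | nil => intro cmds rem; simp [pvOut, pvFlush, pvBlocks]
  | cons l ls ih =>
    intro cmds rem
    by_cases hm : pvIsMsg l = true
    · rw [List.foldl_cons, pvStepA_msg l hm, pvMain_some]
      simp [pvFlush, hm, pvBlocks]
    · have hm' : pvIsMsg l = false := by simpa using hm
      rw [List.foldl_cons, pvStepA_rem l hm', ih]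
      simp [hm']

-- ===== VERDICT (by name: the statement is the Claim_ definition above) =====
theorem parse_slack_commands_spec : Claim_equal_parse_slack_commands := by
  intro text _
  unfold Spec_parse_slack_commands parse_slack_commands parse_slack_commands_alt
  have h := pvMain_none ((PySem.Str.split? text "\n").getD []) [] []
  rcases hst : ((PySem.Str.split? text "\n").getD []).foldl pvStepA ([], [], none) with ⟨c, r, cur⟩
  rw [hst] at h
  simp only [pvOut, List.map_nil, List.nil_append, Prod.mk.injEq] at h
  obtain ⟨h1, h2⟩ := h
  show (List.map PySem.Dict.items (pvFlush c cur), PySem.Str.strip (PySem.Str.join "\n" r)) = _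
  rw [h1, h2]
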